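-- pv_equiv track=rewrite | github.com/leo202000/agentops-network | hairstyle_app/backend/context_compressor.py | _generate_batch_summary
-- ===== SOURCE A (Python) =====
-- from typing import List, Dict, Any, Optional
--
-- def _generate_batch_summary(messages: List[Dict[str, Any]]) -> str:
--     """生成批量摘要"""
--     roles = {}
--     for msg in messages:
--         role = msg.get("role", "unknown")
--         roles[role] = roles.get(role, 0) + 1
--
--     summary_parts = []
--     for role, count in sorted(roles.items()):
--         summary_parts.append(f"{role}:{count}")
--
--     return f"共 {len(messages)} 条消息 ({', '.join(summary_parts)})"
-- ===== SOURCE B (Python) =====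
-- from itertools import groupby
-- from typing import List, Dict, Any
--
-- def _generate_batch_summary(messages: List[Dict[str, Any]]) -> str:
--     """Sort the roles, then count consecutive runs with groupby."""
--     roles = sorted(m.get("role", "unknown") for m in messages)
--     summary_parts = [f"{role}:{sum(1 for _ in grp)}" for role, grp in groupby(roles)]
--     return f"共 {len(messages)} 条消息 ({', '.join(summary_parts)})"
-- ===== Notes on version B (the rewrite author's own statement) =====
-- stated objective: alternative
-- what changed: Replaces the dict-counter plus key-sort of items by sorting the role list once and counting consecutive runs with itertools.groupby.
import Mathlib
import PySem

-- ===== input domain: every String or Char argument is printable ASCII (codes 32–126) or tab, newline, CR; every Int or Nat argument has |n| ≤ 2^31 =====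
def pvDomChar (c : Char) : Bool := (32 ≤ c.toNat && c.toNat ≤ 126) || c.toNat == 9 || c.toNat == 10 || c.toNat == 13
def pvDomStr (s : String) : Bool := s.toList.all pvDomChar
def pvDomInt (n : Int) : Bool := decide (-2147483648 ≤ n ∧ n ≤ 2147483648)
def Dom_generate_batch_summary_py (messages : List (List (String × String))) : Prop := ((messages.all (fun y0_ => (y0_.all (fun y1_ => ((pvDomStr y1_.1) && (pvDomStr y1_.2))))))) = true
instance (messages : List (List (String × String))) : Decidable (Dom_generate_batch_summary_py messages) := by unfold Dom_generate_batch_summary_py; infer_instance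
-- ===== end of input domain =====

-- B sorts the role list once and counts consecutive runs (groupby style) instead of A's dict-counter followed by a sort of its items; an alternative decomposition with the same results.

-- ===== PORT A =====
def generate_batch_summary_py (messages : List (List (String × String))) : String :=
  let roles := messages.foldl (fun d msg =>
    let role := (PySem.Dict.ofList msg).getD "role" "unknown"
    d.insert role (d.getD role 0 + 1)) PySem.Dict.empty
  let sortedItems := PySem.List.sorted2 roles.items (fun p => p.1) (fun p => p.2) false
  let summary_parts := sortedItems.foldl (fun acc p => acc ++ [p.1 ++ ":" ++ PySem.Int.toStr p.2]) []
  "共 " ++ PySem.Int.toStr (messages.length : Int) ++ " 条消息 (" ++ PySem.Str.join ", " summary_parts ++ ")"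

-- ===== PORT B =====
-- msg.get("role", "unknown")
def pvRoleOf (m : List (String × String)) : String := (PySem.Dict.ofList m).getD "role" "unknown"

-- itertools.groupby over a list of strings: one (key, run length) pair per maximal run of equal elements
def pvRuns : List String → List (String × Int)
  | [] => []
  | r :: t =>
    (r, ((t.takeWhile (fun x => x == r)).length : Int) + 1) :: pvRuns (t.dropWhile (fun x => x == r))
termination_by l => l.length
decreasing_by
  exact Nat.lt_succ_of_le (List.length_dropWhile_le _ _)

def generate_batch_summary_py_alt (messages : List (List (String × String))) : String :=
  let roles := PySem.List.sorted (messages.map pvRoleOf) (fun r => r) false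
  let summary_parts := (pvRuns roles).map (fun p => p.1 ++ ":" ++ PySem.Int.toStr p.2)
  "共 " ++ PySem.Int.toStr (messages.length : Int) ++ " 条消息 (" ++ PySem.Str.join ", " summary_parts ++ ")"

-- ===== PRECONDITION & SPEC =====
def Spec_generate_batch_summary_py (messages : List (List (String × String))) (out : String) : Prop := out = generate_batch_summary_py_alt messages
instance (messages : List (List (String × String))) (out : String) : Decidable (Spec_generate_batch_summary_py messages out) := by unfold Spec_generate_batch_summary_py; infer_instance

-- ===== CLAIM (what is proved, stated in full; the proofs are below) =====
def Claim_equal_generate_batch_summary_py : Prop := ∀ (messages : List (List (String × String))), Dom_generate_batch_summary_py messages → Spec_generate_batch_summary_py messages (generate_batch_summary_py messages)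

-- ===== LEMMAS AND PROOFS =====

-- insertBy with a pointwise-equal relation inserts identically
theorem pv_insertBy_congr (r1 r2 : (String × Int) → (String × Int) → Bool) (x : String × Int)
    (ys : List (String × Int)) (h : ∀ y ∈ ys, r1 x y = r2 x y) :
    PySem.List.insertBy r1 x ys = PySem.List.insertBy r2 x ys := by
  induction ys with
  | nil => rfl
  | cons y t ih =>
    simp only [PySem.List.insertBy]
    rw [h y (by simp)]
    by_cases hb : r2 x y = true
    · simp [hb]
    · simp only [Bool.not_eq_true] at hb
      simp [hb, ih (fun z hz => h z (by simp [hz]))]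

theorem pv_foldl_insertBy_congr (r1 r2 : (String × Int) → (String × Int) → Bool)
    (xs acc : List (String × Int))
    (h : ∀ a, (a ∈ xs ∨ a ∈ acc) → ∀ b, (b ∈ xs ∨ b ∈ acc) → r1 a b = r2 a b) :
    xs.foldl (fun acc x => PySem.List.insertBy r1 x acc) acc
      = xs.foldl (fun acc x => PySem.List.insertBy r2 x acc) acc := by
  induction xs generalizing acc with
  | nil => rfl
  | cons x t ih =>
    simp only [List.foldl_cons]
    rw [pv_insertBy_congr r1 r2 x acc (fun y hy => h x (Or.inl (by simp)) y (Or.inr hy))]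
    apply ih
    have hmem : ∀ c, c ∈ PySem.List.insertBy r2 x acc → c = x ∨ c ∈ acc :=
      fun c hc => (PySem.List.insertBy_mem_iff r2 x c acc).mp hc
    have lift : ∀ c, (c ∈ t ∨ c ∈ PySem.List.insertBy r2 x acc) → (c ∈ x :: t ∨ c ∈ acc) := by
      intro c hc
      rcases hc with hc | hc
      · exact Or.inl (List.mem_cons_of_mem x hc)
      · rcases hmem c hc with rfl | hc
        · exact Or.inl (by simp)
        · exact Or.inr hc
    intro a ha b hb
    exact h a (lift a ha) b (lift b hb)

-- Python's tuple sort of (key, value) items with pairwise-distinct keys is the key sort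
theorem pv_sorted2_eq_sorted_fst (xs : List (String × Int))
    (h : ∀ a ∈ xs, ∀ b ∈ xs, a.1 = b.1 → a = b) :
    PySem.List.sorted2 xs (fun p => p.1) (fun p => p.2) false
      = PySem.List.sorted xs (fun p => p.1) false := by
  rw [PySem.List.sorted_eq_foldl_insertBy]
  show xs.foldl (fun acc x => PySem.List.insertBy
      (fun a b => decide (a.1 < b.1) || (!decide (b.1 < a.1) && decide (a.2 < b.2))) x acc) []
    = _
  apply pv_foldl_insertBy_congr
  intro a ha b hb
  simp only [List.not_mem_nil, or_false] at ha hb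
  rcases lt_trichotomy a.1 b.1 with hlt | heq | hgt
  · simp [hlt, not_lt.mpr (le_of_lt hlt)]
  · have : a = b := h a ha b hb heq
    subst this
    simp [lt_self_iff_false]
  · simp [hgt, not_lt.mpr (le_of_lt hgt)]

-- takeWhile (== r) yields only copies of r
theorem pv_take_all_eq (r : String) (t : List String) :
    ∀ x ∈ t.takeWhile (fun x => x == r), x = r := by
  intro x hx
  have := List.mem_takeWhile_imp hx
  simpa using this

-- after dropping the leading copies of r from a sorted list bounded below by r, everything is > r
theorem pv_drop_gt (r : String) (t : List String) (hp : t.Pairwise (· ≤ ·))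
    (hge : ∀ y ∈ t, r ≤ y) :
    ∀ x ∈ t.dropWhile (fun x => x == r), r < x := by
  induction t with
  | nil => intro x hx; simp at hx
  | cons y ys ih =>
    intro x hx
    rw [List.dropWhile_cons] at hx
    by_cases hy : (y == r) = true
    · rw [if_pos hy] at hx
      exact ih (List.pairwise_cons.mp hp).2 (fun z hz => hge z (by simp [hz])) x hx
    · rw [if_neg hy] at hx
      have hyr : y ≠ r := by simpa using hy
      have hry : r < y := lt_of_le_of_ne (hge y (by simp)) (Ne.symm hyr)
      rcases List.mem_cons.mp hx with rfl | hx'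
      · exact hry
      · exact lt_of_lt_of_le hry ((List.pairwise_cons.mp hp).1 x hx')

-- for a ≤-sorted list, pvRuns lists exactly the members together with their multiplicities
theorem pv_runs_mem : ∀ (s : List String), s.Pairwise (· ≤ ·) → ∀ (p : String × Int),
    (p ∈ pvRuns s ↔ p.1 ∈ s ∧ p.2 = (s.count p.1 : Int)) := by
  intro s
  induction s using pvRuns.induct with
  | case1 => intro _ p; simp [pvRuns]
  | case2 r t IH =>
    intro hs p
    obtain ⟨a, b⟩ := p
    have hrt : ∀ y ∈ t, r ≤ y := (List.pairwise_cons.mp hs).1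
    have hpt : t.Pairwise (· ≤ ·) := (List.pairwise_cons.mp hs).2
    have ht2p : (t.dropWhile (fun x => x == r)).Pairwise (· ≤ ·) :=
      List.Pairwise.sublist (List.dropWhile_sublist _) hpt
    have h2 : ∀ x ∈ t.dropWhile (fun x => x == r), r < x := pv_drop_gt r t hpt hrt
    have h1 : ∀ x ∈ t.takeWhile (fun x => x == r), x = r := pv_take_all_eq r t
    have ht : t.takeWhile (fun x => x == r) ++ t.dropWhile (fun x => x == r) = t :=
      List.takeWhile_append_dropWhile
    have hct : List.count r t = (t.takeWhile (fun x => x == r)).length := by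
      conv_lhs => rw [← ht]
      rw [List.count_append,
        List.count_eq_length.mpr (fun c hc => (h1 c hc).symm),
        List.count_eq_zero.mpr (fun hmem => absurd (h2 r hmem) (lt_irrefl r))]
      omega
    have hcr : List.count r (r :: t) = (t.takeWhile (fun x => x == r)).length + 1 := by
      rw [List.count_cons_self, hct]
    have hck : ∀ k, r < k →
        List.count k (r :: t) = List.count k (t.dropWhile (fun x => x == r)) := by
      intro k hk
      have h0 : List.count k (t.takeWhile (fun x => x == r)) = 0 :=
        List.count_eq_zero.mpr (fun hmem => (ne_of_gt hk) (h1 k hmem))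
      rw [List.count_cons_of_ne (ne_of_lt hk)]
      conv_lhs => rw [← ht]
      rw [List.count_append, h0]
      omega
    simp only [pvRuns, List.mem_cons, Prod.mk.injEq]
    rw [IH ht2p (a, b)]
    constructor
    · rintro (⟨rfl, rfl⟩ | ⟨hm, hc⟩)
      · refine ⟨Or.inl rfl, ?_⟩
        rw [hcr]
        push_cast
        ring
      · refine ⟨Or.inr ((List.dropWhile_sublist _).subset hm), ?_⟩
        rw [hck a (h2 a hm)]
        exact hc
    · rintro ⟨hm, hc⟩
      by_cases hpr : a = r
      · subst hpr
        left
        refine ⟨rfl, ?_⟩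
        rw [hc, hcr]
        push_cast
        ring
      · right
        have hmt : a ∈ t := by
          rcases hm with h | h
          · exact absurd h hpr
          · exact h
        have hmt2 : a ∈ t.dropWhile (fun x => x == r) := by
          rw [← ht] at hmt
          rcases List.mem_append.mp hmt with h | h
          · exact absurd (h1 a h) hpr
          · exact h
        refine ⟨hmt2, ?_⟩
        rw [hck a (h2 a hmt2)] at hc
        exact hc

-- for a ≤-sorted list, the run keys are strictly increasing
theorem pv_runs_pairwise : ∀ (s : List String), s.Pairwise (· ≤ ·) →
    (pvRuns s).Pairwise (fun a b => a.1 < b.1) := by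
  intro s
  induction s using pvRuns.induct with
  | case1 => intro _; simp [pvRuns]
  | case2 r t IH =>
    intro hs
    have hrt : ∀ y ∈ t, r ≤ y := (List.pairwise_cons.mp hs).1
    have hpt : t.Pairwise (· ≤ ·) := (List.pairwise_cons.mp hs).2
    have ht2p : (t.dropWhile (fun x => x == r)).Pairwise (· ≤ ·) :=
      List.Pairwise.sublist (List.dropWhile_sublist _) hpt
    have h2 : ∀ x ∈ t.dropWhile (fun x => x == r), r < x := pv_drop_gt r t hpt hrt
    simp only [pvRuns]
    rw [List.pairwise_cons]
    refine ⟨?_, IH ht2p⟩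
    intro q hq
    exact h2 q.1 ((pv_runs_mem _ ht2p q).mp hq).1

theorem pv_main (messages : List (List (String × String))) :
    generate_batch_summary_py messages = generate_batch_summary_py_alt messages := by
  simp only [generate_batch_summary_py, generate_batch_summary_py_alt]
  have hfold : messages.foldl (fun d msg =>
      d.insert ((PySem.Dict.ofList msg).getD "role" "unknown")
        (d.getD ((PySem.Dict.ofList msg).getD "role" "unknown") 0 + 1)) PySem.Dict.empty
      = PySem.Dict.counter (messages.map pvRoleOf) := by
    rw [← PySem.Dict.foldl_insert_getD_add_one_eq_counter, List.foldl_map]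
    rfl
  rw [hfold, PySem.Dict.items_counter]
  have hs : (PySem.List.sorted (messages.map pvRoleOf) (fun r => r) false).Pairwise (· ≤ ·) := by
    have := PySem.List.sorted_pairwise (messages.map pvRoleOf) (fun r => r)
    simpa using this
  have hsp : (PySem.List.sorted (messages.map pvRoleOf) (fun r => r) false).Perm
      (messages.map pvRoleOf) := PySem.List.sorted_perm _ _ _
  have hinj : ∀ a ∈ (PySem.Set.ofList (messages.map pvRoleOf)).map
        (fun k => (k, (List.count k (messages.map pvRoleOf) : Int))),
      ∀ b ∈ (PySem.Set.ofList (messages.map pvRoleOf)).map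
        (fun k => (k, (List.count k (messages.map pvRoleOf) : Int))),
      a.1 = b.1 → a = b := by
    intro a ha b hb hab
    obtain ⟨ka, _, rfl⟩ := List.mem_map.mp ha
    obtain ⟨kb, _, rfl⟩ := List.mem_map.mp hb
    simp only at hab
    subst hab
    rfl
  rw [pv_sorted2_eq_sorted_fst _ hinj]
  have hnd1 : (pvRuns (PySem.List.sorted (messages.map pvRoleOf) (fun r => r) false)).Nodup := by
    have h := pv_runs_pairwise _ hs
    exact h.imp (fun {a b} hlt heq => absurd (heq ▸ hlt) (lt_irrefl _))
  have hnd2 : ((PySem.Set.ofList (messages.map pvRoleOf)).map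
      (fun k => (k, (List.count k (messages.map pvRoleOf) : Int)))).Nodup := by
    refine List.Nodup.map ?_ (PySem.Set.nodup_ofList _)
    intro x y hxy
    simpa using congrArg Prod.fst hxy
  have hperm : (pvRuns (PySem.List.sorted (messages.map pvRoleOf) (fun r => r) false)).Perm
      ((PySem.Set.ofList (messages.map pvRoleOf)).map
        (fun k => (k, (List.count k (messages.map pvRoleOf) : Int)))) := by
    rw [List.perm_ext_iff_of_nodup hnd1 hnd2]
    intro x
    rw [pv_runs_mem _ hs x]
    constructor
    · rintro ⟨hm, hc⟩
      refine List.mem_map.mpr ⟨x.1, ?_, ?_⟩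
      · exact (PySem.Set.mem_ofList _ _).mpr (hsp.mem_iff.mp hm)
      · obtain ⟨a, b⟩ := x
        simp only [Prod.mk.injEq, true_and]
        rw [← hsp.count_eq a]
        exact hc.symm
    · intro hx
      obtain ⟨k, hk, heq⟩ := List.mem_map.mp hx
      rw [← heq]
      refine ⟨hsp.mem_iff.mpr ((PySem.Set.mem_ofList _ _).mp hk), ?_⟩
      rw [hsp.count_eq k]
  rw [PySem.List.sorted_eq_of_perm_of_pairwise_lt _ _ (fun p => p.1) hperm (pv_runs_pairwise _ hs)]
  rw [PySem.List.foldl_append_singleton_eq_map]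
  simp only [List.nil_append]

-- ===== VERDICT (by name: the statement is the Claim_ definition above) =====
theorem generate_batch_summary_py_spec : Claim_equal_generate_batch_summary_py := by
  intro messages _
  exact pv_main messages
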